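-- pv_equiv track=rewrite | github.com/pypi-data/pypi-mirror-280 | packages/nemo-library/nemo_library-1.0.33-py3-none-any.whl/nemo_library/nemo_library.py | int_to_base62
-- ===== SOURCE A (Python) =====
-- def int_to_base62(n):
--     chars = "0123456789ABCDEFGHIJKLMNOPQRSTUVWXYZabcdefghijklmnopqrstuvwxyz"
--     if n == 0:
--         return "0"
--     arr = []
--     while n:
--         n, rem = divmod(n, 62)
--         arr.append(chars[rem])
--     arr.reverse()
--     if len(arr) > 1 and arr[0] == "1":
--         arr[0] = "z"
--     return "".join(arr)
-- ===== SOURCE B (Python) =====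
-- def int_to_base62(n):
--     chars = "0123456789ABCDEFGHIJKLMNOPQRSTUVWXYZabcdefghijklmnopqrstuvwxyz"
--     if n == 0:
--         return "0"
--     p = 1
--     while p * 62 <= n:
--         p *= 62
--     out = ""
--     while p:
--         d = n // p
--         out += chars[d]
--         n -= d * p
--         p //= 62
--     if len(out) > 1 and out[0] == "1":
--         out = "z" + out[1:]
--     return out
-- ===== Notes on version B (the rewrite author's own statement) =====
-- stated objective: alternative
-- what changed: Replaces A's divmod-accumulate-then-reverse loop with a most-significant-digit-first scan: first find the largest power of 62 not exceeding n, then peel digits off the top by dividing by descending powers, so no list, reverse or join is needed; Pre_ excludes negative n, on which A's while loop never terminates.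
import Mathlib
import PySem

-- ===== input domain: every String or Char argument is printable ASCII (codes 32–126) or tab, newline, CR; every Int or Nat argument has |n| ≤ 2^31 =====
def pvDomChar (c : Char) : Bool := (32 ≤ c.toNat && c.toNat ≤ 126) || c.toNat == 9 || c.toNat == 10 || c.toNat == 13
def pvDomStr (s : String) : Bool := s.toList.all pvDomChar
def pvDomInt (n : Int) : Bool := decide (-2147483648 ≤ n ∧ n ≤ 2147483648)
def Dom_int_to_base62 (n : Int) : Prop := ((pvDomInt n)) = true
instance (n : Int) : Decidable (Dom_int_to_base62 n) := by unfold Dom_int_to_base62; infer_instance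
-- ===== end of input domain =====

-- B converts most-significant digit first by scanning descending powers of 62 instead of A's
-- divmod-accumulate-then-reverse loop; return values agree on all n ≥ 0 (Pre_ excludes n < 0,
-- where A's while loop never terminates).

def pvChars : List Char := "0123456789ABCDEFGHIJKLMNOPQRSTUVWXYZabcdefghijklmnopqrstuvwxyz".toList

-- ===== PORT A =====
-- A's while loop: append chars[n % 62] and continue with n // 62; Python's loop runs while
-- n ≠ 0 and never terminates for negative n, so the port loops while 0 < n (Pre_ gives n ≥ 0).
def pvALoop (n : Int) (arr : List Char) : List Char :=
  if h : 0 < n then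
    pvALoop (PySem.Int.floordiv n 62) (arr ++ [(PySem.List.pyGet? pvChars (PySem.Int.mod n 62)).getD ' '])
  else arr
termination_by n.toNat
decreasing_by
  have h2 : PySem.Int.floordiv n 62 = n / 62 := PySem.Int.floordiv_eq_ediv_of_pos (by omega)
  rw [h2]; omega

def int_to_base62 (n : Int) : String :=
  if n == 0 then "0"
  else
    let arr := (pvALoop n []).reverse
    let arr := if arr.length > 1 && (PySem.List.pyGet? arr 0).getD ' ' == '1'
               then arr.set 0 'z' else arr
    String.mk arr

-- ===== PORT B =====
-- B's first loop: grow p by factors of 62 while p * 62 ≤ n (p stays positive in Python, so the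
-- 0 < p conjunct only makes the same computation total).
def pvPow (p n : Int) : Int :=
  if h : 0 < p ∧ p * 62 ≤ n then pvPow (p * 62) n else p
termination_by (n - p).toNat
decreasing_by omega

-- B's second loop: while p, emit chars[n // p], subtract, shrink p by // 62 (Python's `while p:`
-- with p ≥ 1 throughout is 0 < p).
def pvBLoop (p n : Int) : List Char :=
  if h : 0 < p then
    (PySem.List.pyGet? pvChars (PySem.Int.floordiv n p)).getD ' ' ::
      pvBLoop (PySem.Int.floordiv p 62) (n - PySem.Int.floordiv n p * p)
  else []
termination_by p.toNat
decreasing_by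
  have h2 : PySem.Int.floordiv p 62 = p / 62 := PySem.Int.floordiv_eq_ediv_of_pos (by omega)
  rw [h2]; omega

def int_to_base62_alt (n : Int) : String :=
  if n == 0 then "0"
  else
    let s := pvBLoop (pvPow 1 n) n
    let s := if s.length > 1 && (PySem.List.pyGet? s 0).getD ' ' == '1'
             then 'z' :: s.drop 1 else s
    String.mk s

-- ===== PRECONDITION & SPEC =====
-- Pre_ excludes negative n: there A's `while n:` loop never terminates (divmod keeps n at -1),
-- so A returns on exactly the inputs Pre_ admits.
def Pre_int_to_base62 (n : Int) : Prop := 0 ≤ n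
instance (n : Int) : Decidable (Pre_int_to_base62 n) := by unfold Pre_int_to_base62; infer_instance
def pvWitness_int_to_base62 : Int := (125)

def Spec_int_to_base62 (n : Int) (out : String) : Prop := out = int_to_base62_alt n
instance (n : Int) (out : String) : Decidable (Spec_int_to_base62 n out) := by unfold Spec_int_to_base62; infer_instance

-- ===== CLAIM (what is proved, stated in full; the proofs are below) =====
def Claim_equal_int_to_base62 : Prop := ∀ (n : Int), Dom_int_to_base62 n → Pre_int_to_base62 n → Spec_int_to_base62 n (int_to_base62 n)

-- ===== LEMMAS AND PROOFS =====

-- digit character for a Nat digit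
def pvCharOf (d : Nat) : Char := (PySem.List.pyGet? pvChars (d : Int)).getD ' '

-- canonical msd-first digit string (no leading zeros), over Nat
def pvMsd (n : Nat) : List Char :=
  if h : 0 < n then pvMsd (n / 62) ++ [pvCharOf (n % 62)] else []
termination_by n
decreasing_by exact Nat.div_lt_self h (by norm_num)

-- fixed-width msd-first digits via powers, over Nat (shape of B's second loop)
def pvDL : Nat → Nat → List Char
  | 0, _ => []
  | k + 1, n => pvCharOf (n / 62 ^ k) :: pvDL k (n % 62 ^ k)

theorem pvALoop_eq (n : Int) (acc : List Char) (hn : 0 ≤ n) :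
    pvALoop n acc = acc ++ (pvMsd n.toNat).reverse := by
  by_cases h : 0 < n
  · have hd : PySem.Int.floordiv n 62 = n / 62 := PySem.Int.floordiv_eq_ediv_of_pos (by omega)
    have hm : PySem.Int.mod n 62 = n % 62 := PySem.Int.mod_eq_emod_of_pos (by omega)
    have h1 : (PySem.Int.floordiv n 62).toNat = n.toNat / 62 := by rw [hd]; omega
    have h2 : PySem.Int.mod n 62 = ((n.toNat % 62 : Nat) : Int) := by rw [hm]; omega
    have hmsd : pvMsd n.toNat = pvMsd (n.toNat / 62) ++ [pvCharOf (n.toNat % 62)] := by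
      rw [pvMsd, dif_pos (by omega : 0 < n.toNat)]
    rw [pvALoop, dif_pos h, pvALoop_eq (PySem.Int.floordiv n 62) _ (by rw [hd]; positivity),
      h1, h2, hmsd]
    simp [pvCharOf]
  · have hz : n.toNat = 0 := by omega
    rw [pvALoop, dif_neg h, hz, pvMsd, dif_neg (by omega : ¬ (0:Nat) < 0)]
    simp
termination_by n.toNat
decreasing_by
  have h2 : PySem.Int.floordiv n 62 = n / 62 := PySem.Int.floordiv_eq_ediv_of_pos (by omega)
  rw [h2]; omega

theorem pvPow_spec (p n : Int) (hp : 0 < p) (hpn : p ≤ n) :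
    pvPow p n ≤ n ∧ n < pvPow p n * 62 ∧ ∃ j : Nat, pvPow p n = p * 62 ^ j := by
  rw [pvPow]
  by_cases h : 0 < p ∧ p * 62 ≤ n
  · rw [dif_pos h]
    obtain ⟨h1, h2, j, h3⟩ := pvPow_spec (p * 62) n (by omega) h.2
    exact ⟨h1, h2, j + 1, by rw [h3]; ring⟩
  · rw [dif_neg h]
    exact ⟨hpn, by omega, 0, by ring⟩
termination_by (n - p).toNat
decreasing_by omega

theorem pvBLoop_eq (k : Nat) (n : Nat) :
    pvBLoop ((62 : Int) ^ k) (n : Int) = pvDL (k + 1) n := by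
  induction k generalizing n with
  | zero =>
      rw [pvBLoop, dif_pos (by norm_num)]
      have hd : PySem.Int.floordiv (n : Int) ((62:Int)^0) = (n : Int) := by
        rw [PySem.Int.floordiv_eq_ediv_of_pos (by norm_num)]; simp
      have hp : PySem.Int.floordiv ((62:Int)^0) 62 = 0 := by
        rw [PySem.Int.floordiv_eq_ediv_of_pos (by norm_num)]; decide
      rw [hd, hp, pvBLoop, dif_neg (by norm_num)]
      simp [pvDL, pvCharOf]
  | succ k ih =>
      rw [pvBLoop, dif_pos (by positivity)]
      have hd : PySem.Int.floordiv (n : Int) ((62:Int)^(k+1)) = (n : Int) / (62:Int)^(k+1) :=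
        PySem.Int.floordiv_eq_ediv_of_pos (by positivity)
      have hp : PySem.Int.floordiv ((62:Int)^(k+1)) 62 = (62:Int)^k := by
        rw [PySem.Int.floordiv_eq_ediv_of_pos (by norm_num), pow_succ]
        exact Int.mul_ediv_cancel _ (by norm_num)
      have hcast : (n : Int) / (62:Int)^(k+1) = ((n / 62 ^ (k+1) : Nat) : Int) := by
        push_cast; rfl
      have hrem : (n : Int) - (n : Int) / (62:Int)^(k+1) * (62:Int)^(k+1)
          = ((n % 62 ^ (k+1) : Nat) : Int) := by
        push_cast
        rw [Int.emod_def]; ring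
      rw [hd, hp, hrem, hcast, ih]
      simp [pvDL, pvCharOf]

-- peeling one digit off the bottom of the fixed-width form
theorem pvDL_shift (k : Nat) (n : Nat) (hn : n < 62 ^ (k + 1)) :
    pvDL (k + 1) n = pvDL k (n / 62) ++ [pvCharOf (n % 62)] := by
  induction k generalizing n with
  | zero =>
      simp only [pvDL, pow_zero, Nat.div_one, List.nil_append]
      rw [Nat.mod_eq_of_lt (by simpa using hn)]
  | succ k ih =>
      have h1 : n % 62 ^ (k + 1) < 62 ^ (k + 1) := Nat.mod_lt _ (by positivity)
      have e1 : n / 62 ^ (k + 1) = n / 62 / 62 ^ k := by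
        rw [Nat.div_div_eq_div_mul, pow_succ']
      have e2 : n % 62 ^ (k + 1) / 62 = n / 62 % 62 ^ k := by
        rw [pow_succ']; exact Nat.mod_mul_right_div_self n 62 (62 ^ k)
      have e3 : n % 62 ^ (k + 1) % 62 = n % 62 := by
        rw [pow_succ']; exact Nat.mod_mul_right_mod n 62 (62 ^ k)
      calc pvDL (k + 1 + 1) n
          = pvCharOf (n / 62 ^ (k + 1)) :: pvDL (k + 1) (n % 62 ^ (k + 1)) := rfl
        _ = pvCharOf (n / 62 ^ (k + 1)) ::
              (pvDL k (n % 62 ^ (k + 1) / 62) ++ [pvCharOf (n % 62 ^ (k + 1) % 62)]) := by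
            rw [ih _ h1]
        _ = pvCharOf (n / 62 / 62 ^ k) :: (pvDL k (n / 62 % 62 ^ k) ++ [pvCharOf (n % 62)]) := by
            rw [e1, e2, e3]
        _ = pvDL (k + 1) (n / 62) ++ [pvCharOf (n % 62)] := rfl

-- in the exact-width window the fixed-width form is the canonical msd string
theorem pvDL_eq_msd (k : Nat) (n : Nat) (h1 : 62 ^ k ≤ n) (h2 : n < 62 ^ (k + 1)) :
    pvDL (k + 1) n = pvMsd n := by
  induction k generalizing n with
  | zero =>
      have hn62 : n < 62 := by simpa using h2
      have hpos : 0 < n := lt_of_lt_of_le (by norm_num) h1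
      have hmsd : pvMsd n = pvMsd (n / 62) ++ [pvCharOf (n % 62)] := by
        rw [pvMsd, dif_pos hpos]
      have hz : pvMsd (n / 62) = [] := by
        rw [pvMsd, dif_neg (by simp [Nat.div_eq_of_lt hn62])]
      rw [hmsd, hz]
      simp [pvDL, Nat.mod_eq_of_lt hn62]
  | succ k ih =>
      have hpos : 0 < n := lt_of_lt_of_le (by positivity) h1
      have hdl : 62 ^ k ≤ n / 62 := (Nat.le_div_iff_mul_le (by norm_num)).mpr (by
        calc 62 ^ k * 62 = 62 ^ (k + 1) := by rw [pow_succ]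
        _ ≤ n := h1)
      have hdu : n / 62 < 62 ^ (k + 1) := by
        rw [Nat.div_lt_iff_lt_mul (by norm_num)]
        calc n < 62 ^ (k + 2) := h2
        _ = 62 ^ (k + 1) * 62 := by rw [pow_succ]
      have hmsd : pvMsd n = pvMsd (n / 62) ++ [pvCharOf (n % 62)] := by
        rw [pvMsd, dif_pos hpos]
      rw [pvDL_shift _ _ h2, ih _ hdl hdu, hmsd]

theorem pvFix_eq (s : List Char) :
    (if s.length > 1 && (PySem.List.pyGet? s 0).getD ' ' == '1' then s.set 0 'z' else s)
    = (if s.length > 1 && (PySem.List.pyGet? s 0).getD ' ' == '1' then 'z' :: s.drop 1 else s) := by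
  cases s with
  | nil => simp
  | cons c t => simp [List.set]

-- ===== VERDICT (by name: the statement is the Claim_ definition above) =====
theorem int_to_base62_spec : Claim_equal_int_to_base62 := by
  intro n _ hpre
  unfold Spec_int_to_base62 int_to_base62 int_to_base62_alt
  by_cases h0 : n = 0
  · simp [h0]
  · have hn1 : 1 ≤ n := by
      have : 0 ≤ n := hpre
      omega
    simp only [beq_iff_eq, if_neg h0]
    obtain ⟨hle, hlt, j, hj⟩ := pvPow_spec 1 n (by norm_num) hn1
    rw [one_mul] at hj
    have hcast : n = ((n.toNat : Nat) : Int) := by omega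
    have hB : pvBLoop (pvPow 1 n) n = pvMsd n.toNat := by
      rw [hj, hcast, pvBLoop_eq]
      apply pvDL_eq_msd
      · have : (62:Int)^j ≤ ((n.toNat : Nat) : Int) := by rw [← hcast, ← hj]; exact hle
        have h62 : ((62:Nat)^j : Int) = (62:Int)^j := by push_cast; rfl
        exact_mod_cast h62 ▸ this
      · have : ((n.toNat : Nat) : Int) < (62:Int)^(j+1) := by
          rw [← hcast]
          calc n < pvPow 1 n * 62 := hlt
          _ = (62:Int)^(j+1) := by rw [hj, pow_succ]
        exact_mod_cast (by push_cast; rfl : ((62:Nat)^(j+1) : Int) = (62:Int)^(j+1)) ▸ this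
    rw [hB, pvALoop_eq n [] hpre]
    simp only [List.nil_append, List.reverse_reverse]
    rw [pvFix_eq]
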